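-- pv_equiv track=rewrite | github.com/manojmw/grexome-TIMC-Secondary | 5.2_addInteractome.py | CountCandidateGenes
-- ===== SOURCE A (Python) =====
-- def CountCandidateGenes(CandidateGene_dict, pathologies_list):
--
--     # List for counting total candidate genes
--     # associated with each pathology
--     pathology_CandidateCount = [0] * len(pathologies_list)
--
--     # Data lines
--     for candidateGene in CandidateGene_dict:
--         for pathology in CandidateGene_dict[candidateGene]:
--             for i in range(len(pathologies_list)):
--                 if pathology == pathologies_list[i]:
--                     pathology_CandidateCount[i] += 1
--
--     return pathology_CandidateCount
-- ===== SOURCE B (Python) =====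
-- def CountCandidateGenes(CandidateGene_dict, pathologies_list):
--     # Tabulate: one pass counting every pathology occurrence, then emit per position.
--     counts = {}
--     for pathologies in CandidateGene_dict.values():
--         for p in pathologies:
--             counts[p] = counts.get(p, 0) + 1
--     return [counts.get(p, 0) for p in pathologies_list]
-- ===== Notes on version B (the rewrite author's own statement) =====
-- stated objective: faster
-- what changed: Replaces the triple nested loop (a linear scan of pathologies_list for every pathology of every gene) by a single tabulation pass into a dict of counts followed by one comprehension over pathologies_list.
import Mathlib
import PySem

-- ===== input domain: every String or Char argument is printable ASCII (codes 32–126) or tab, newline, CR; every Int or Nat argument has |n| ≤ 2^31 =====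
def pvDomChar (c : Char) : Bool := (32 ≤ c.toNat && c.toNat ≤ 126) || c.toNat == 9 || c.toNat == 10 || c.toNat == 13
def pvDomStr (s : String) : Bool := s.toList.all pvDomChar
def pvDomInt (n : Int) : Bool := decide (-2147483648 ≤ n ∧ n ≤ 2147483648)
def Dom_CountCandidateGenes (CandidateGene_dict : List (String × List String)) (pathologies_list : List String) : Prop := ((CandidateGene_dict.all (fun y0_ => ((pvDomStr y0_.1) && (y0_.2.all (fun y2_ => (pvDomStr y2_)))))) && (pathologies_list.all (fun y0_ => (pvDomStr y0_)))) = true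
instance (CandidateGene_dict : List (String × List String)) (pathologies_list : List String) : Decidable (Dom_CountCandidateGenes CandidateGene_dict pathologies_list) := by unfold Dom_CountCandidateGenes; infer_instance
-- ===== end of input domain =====

-- B replaces A's triple nested loop by one tabulation pass into a dict of counts plus one
-- emission pass over pathologies_list (objective: faster).

-- ===== PORT A =====
-- the innermost `for i in range(len(pathologies_list))` loop of A;
-- `pathology_CandidateCount[i] += 1`: i is a valid index of counts here, so the
-- read/write is `getD i.toNat 0` / `set i.toNat` (exact)
def pvBumpA (pathologies_list : List String) (counts : List Int) (pathology : String) : List Int :=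
  (PySem.List.pyRange 0 (pathologies_list.length : Int) 1).foldl
    (fun counts i =>
      if some pathology = PySem.List.pyGet? pathologies_list i then
        counts.set i.toNat (counts.getD i.toNat 0 + 1)
      else counts) counts

def CountCandidateGenes (CandidateGene_dict : List (String × List String)) (pathologies_list : List String) : List Int :=
  let pathology_CandidateCount : List Int := List.replicate pathologies_list.length 0
  CandidateGene_dict.foldl
    (fun counts candidateGene =>
      -- `CandidateGene_dict[candidateGene]`: first-match lookup, exact since keys are
      -- distinct under Pre_ (and then always succeeds, so `.getD []` is never used)
      ((CandidateGene_dict.lookup candidateGene.1).getD []).foldl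
        (fun counts pathology => pvBumpA pathologies_list counts pathology) counts)
    pathology_CandidateCount

-- ===== PORT B =====
def CountCandidateGenes_alt (CandidateGene_dict : List (String × List String)) (pathologies_list : List String) : List Int :=
  let counts : PySem.Dict String Int :=
    CandidateGene_dict.foldl
      (fun counts e => e.2.foldl (fun counts p => counts.insert p (counts.getD p 0 + 1)) counts)
      PySem.Dict.empty
  pathologies_list.map (fun p => counts.getD p 0)

-- ===== PRECONDITION & SPEC =====
-- Pre_ excludes association lists with duplicate keys: CandidateGene_dict stands for a Python
-- dict, which cannot hold duplicate keys, so such lists represent no actual input of A.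
def Pre_CountCandidateGenes (CandidateGene_dict : List (String × List String)) (pathologies_list : List String) : Prop :=
  (CandidateGene_dict.map Prod.fst).Nodup

instance (CandidateGene_dict : List (String × List String)) (pathologies_list : List String) : Decidable (Pre_CountCandidateGenes CandidateGene_dict pathologies_list) := by unfold Pre_CountCandidateGenes; infer_instance

def pvWitness_CountCandidateGenes : (List (String × List String)) × List String :=
  ([("g1", ["p1", "p2"]), ("g2", ["p1"])], ["p1", "p2", "p3"])

def Spec_CountCandidateGenes (CandidateGene_dict : List (String × List String)) (pathologies_list : List String) (out : List Int) : Prop := out = CountCandidateGenes_alt CandidateGene_dict pathologies_list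
instance (CandidateGene_dict : List (String × List String)) (pathologies_list : List String) (out : List Int) : Decidable (Spec_CountCandidateGenes CandidateGene_dict pathologies_list out) := by unfold Spec_CountCandidateGenes; infer_instance

-- ===== CLAIM (what is proved, stated in full; the proofs are below) =====
def Claim_equal_CountCandidateGenes : Prop := ∀ (CandidateGene_dict : List (String × List String)) (pathologies_list : List String), Dom_CountCandidateGenes CandidateGene_dict pathologies_list → Pre_CountCandidateGenes CandidateGene_dict pathologies_list → Spec_CountCandidateGenes CandidateGene_dict pathologies_list (CountCandidateGenes CandidateGene_dict pathologies_list)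

-- ===== LEMMAS AND PROOFS =====

-- first-match lookup in an assoc list with distinct keys finds each entry's own value
lemma lookup_of_nodup (d : List (String × List String)) (k : String) (v : List String)
    (h : (d.map Prod.fst).Nodup) (hm : (k, v) ∈ d) : d.lookup k = some v := by
  induction d with
  | nil => cases hm
  | cons e rest ih =>
    rw [List.mem_cons] at hm
    simp only [List.map_cons, List.nodup_cons, List.mem_map] at h
    simp only [List.lookup]
    rcases hm with hm | hm
    · subst hm; simp
    · have hne : (k == e.1) = false := by
        apply beq_eq_false_iff_ne.mpr
        intro he
        exact h.1 ⟨(k, v), hm, he⟩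
      rw [hne]
      exact ih h.2 hm

-- pointwise effect of A's innermost range loop, for an arbitrary range bound n
lemma bumpA_loop_getElem? (pl : List String) (p : String) (n : Nat) (counts : List Int) (j : Nat) :
    ((PySem.List.pyRange 0 (n : Int) 1).foldl
      (fun counts i =>
        if some p = PySem.List.pyGet? pl i then
          counts.set i.toNat (counts.getD i.toNat 0 + 1)
        else counts) counts)[j]? =
    if j < n ∧ pl[j]? = some p then counts[j]?.map (· + 1) else counts[j]? := by
  induction n generalizing counts with
  | zero =>
    rw [PySem.List.pyRange_one_eq_nil (by norm_num)]
    simp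
  | succ n ih =>
    have hc : ((n + 1 : Nat) : Int) = (n : Int) + 1 := by push_cast; ring
    rw [hc, PySem.List.pyRange_one_succ_right (by positivity), List.foldl_append,
      List.foldl_cons, List.foldl_nil]
    simp only [PySem.List.pyGet?_natCast, Int.toNat_natCast]
    set L := ((PySem.List.pyRange 0 (n : Int) 1).foldl
      (fun counts i =>
        if some p = PySem.List.pyGet? pl i then
          counts.set i.toNat (counts.getD i.toNat 0 + 1)
        else counts) counts) with hL
    by_cases hp : pl[n]? = some p
    · rw [if_pos hp.symm]
      by_cases hj : j = n
      · subst hj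
        rw [List.getElem?_set_self']
        have hLj : L[j]? = counts[j]? := by rw [ih]; simp
        rw [hLj]
        have hgd : L.getD j 0 = (counts[j]?).getD 0 := by
          rw [List.getD_eq_getElem?_getD, hLj]
        rw [hgd]
        cases hcj : counts[j]? with
        | none => simp
        | some c => simp [hp]
      · rw [List.getElem?_set_ne (fun h => hj h.symm), ih]
        have : (j < n ∧ pl[j]? = some p) ↔ (j < n + 1 ∧ pl[j]? = some p) := by
          constructor
          · rintro ⟨h1, h2⟩; exact ⟨Nat.lt_succ_of_lt h1, h2⟩
          · rintro ⟨h1, h2⟩; exact ⟨by omega, h2⟩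
        rw [if_congr this rfl rfl]
    · rw [if_neg (fun h => hp h.symm), ih]
      have : (j < n ∧ pl[j]? = some p) ↔ (j < n + 1 ∧ pl[j]? = some p) := by
        constructor
        · rintro ⟨h1, h2⟩; exact ⟨Nat.lt_succ_of_lt h1, h2⟩
        · rintro ⟨h1, h2⟩
          refine ⟨?_, h2⟩
          rcases Nat.lt_succ_iff_lt_or_eq.mp h1 with h | h
          · exact h
          · subst h; exact absurd h2 hp
      rw [if_congr this rfl rfl]

lemma bumpA_getElem? (pl : List String) (counts : List Int) (p : String) (j : Nat) :
    (pvBumpA pl counts p)[j]? =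
      if j < pl.length ∧ pl[j]? = some p then counts[j]?.map (· + 1) else counts[j]? := by
  unfold pvBumpA
  exact bumpA_loop_getElem? pl p pl.length counts j

-- pointwise effect of folding A's bump over a flat list of pathologies
lemma foldl_bumpA_getElem? (pl : List String) (ps : List String) (counts : List Int) (j : Nat) :
    (ps.foldl (pvBumpA pl) counts)[j]? =
      match pl[j]? with
      | some q => counts[j]?.map (· + (ps.count q : Int))
      | none => counts[j]? := by
  induction ps generalizing counts with
  | nil =>
    cases hq : pl[j]? with
    | none => rfl
    | some q => simp
  | cons p ps ih =>
    rw [List.foldl_cons, ih]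
    cases hq : pl[j]? with
    | none =>
      have hlen : ¬ j < pl.length := by
        have := List.getElem?_eq_none_iff.mp hq; omega
      simp [bumpA_getElem?, hlen]
    | some q =>
      have hlen : j < pl.length := (List.getElem?_eq_some_iff.mp hq).1
      rw [bumpA_getElem?]
      by_cases hpq : q = p
      · subst hpq
        rw [if_pos ⟨hlen, hq⟩]
        cases hcj : counts[j]? with
        | none => simp
        | some c =>
          simp
          ring
      · rw [if_neg (by rintro ⟨-, h⟩; rw [hq] at h; exact hpq (Option.some.inj h))]
        have hne : ¬ p = q := fun h => hpq h.symm
        simp [hne]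

-- ===== VERDICT (by name: the statement is the Claim_ definition above) =====
theorem CountCandidateGenes_spec : Claim_equal_CountCandidateGenes := by
  intro d pl _hDom hPre
  unfold Spec_CountCandidateGenes CountCandidateGenes CountCandidateGenes_alt
  -- A: replace the dict lookup by each entry's own value (keys are distinct)
  have hA : d.foldl
      (fun counts e => ((d.lookup e.1).getD []).foldl (fun c p => pvBumpA pl c p) counts)
      (List.replicate pl.length 0) =
      (d.flatMap (fun e => e.2)).foldl (pvBumpA pl) (List.replicate pl.length 0) := by
    rw [List.foldl_flatMap]
    apply PySem.List.foldl_congr_mem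
    intro acc e he
    rw [lookup_of_nodup d e.1 e.2 hPre (by simpa using he)]
    rfl
  -- B: the nested counting fold is the counter of the same flat list
  have hB : d.foldl
      (fun counts e => e.2.foldl (fun c p => PySem.Dict.insert c p (c.getD p 0 + 1)) counts)
      PySem.Dict.empty = PySem.Dict.counter (d.flatMap (fun e => e.2)) := by
    rw [← PySem.Dict.foldl_insert_getD_add_one_eq_counter, List.foldl_flatMap]
  simp only []
  rw [hA, hB]
  apply List.ext_getElem?
  intro j
  rw [foldl_bumpA_getElem?, List.getElem?_map]
  cases hq : pl[j]? with
  | none =>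
    have hlen : ¬ j < pl.length := by
      have := List.getElem?_eq_none_iff.mp hq; omega
    simp [hlen]
  | some q =>
    have hlen : j < pl.length := (List.getElem?_eq_some_iff.mp hq).1
    simp [hlen, PySem.Dict.getD_counter]
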